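-- pv_equiv track=rewrite | github.com/yousefkhaled2005/eng-joooo | app.py | build_voice_index
-- ===== SOURCE A (Python) =====
-- from collections import defaultdict
--
-- def build_voice_index(voices):
--     index = defaultdict(lambda: defaultdict(lambda: defaultdict(list)))
--     for v in voices:
--         locale = v.get("Locale") or ""
--         short = v.get("ShortName")
--         gender = v.get("Gender") or "Unknown"
--         if not locale or not short:
--             continue
--         lang = locale.split("-")[0].lower()
--         index[lang][gender][locale].append(v)
--
--     for lang in index:
--         for gender in index[lang]:
--             for locale in index[lang][gender]:
--                 index[lang][gender][locale] = sorted(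
--                     index[lang][gender][locale],
--                     key=lambda x: (x.get("FriendlyName") or "")
--                 )
--     return index
-- ===== SOURCE B (Python) =====
-- def build_voice_index(voices):
--     # Pure group-by decomposition: extract (lang, (gender, (locale, voice))) tuples once,
--     # then build plain nested dicts by first-appearance key order + filtering; no defaultdict mutation.
--     def entry(v):
--         locale = v.get("Locale") or ""
--         if locale and v.get("ShortName"):
--             gender = v.get("Gender") or "Unknown"
--             return (locale.split("-")[0].lower(), (gender, (locale, v)))
--         return None
--
--     entries = [e for e in map(entry, voices) if e is not None]
--
--     def group(pairs):
--         keys = list(dict.fromkeys(k for k, _ in pairs))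
--         return [(k, [r for kk, r in pairs if kk == k]) for k in keys]
--
--     def fname(x):
--         return x.get("FriendlyName") or ""
--
--     return {
--         lang: {
--             gender: {
--                 locale: sorted(vs, key=fname)
--                 for locale, vs in group(l2)
--             }
--             for gender, l2 in group(l1)
--         }
--         for lang, l1 in group(entries)
--     }
-- ===== Notes on version B (the rewrite author's own statement) =====
-- stated objective: alternative
-- what changed: Replaces the incremental nested-defaultdict mutation plus in-place per-bucket sorting with a pure group-by decomposition: extract (lang,gender,locale,voice) tuples once, then build plain nested dicts by first-appearance key order and filtering, sorting each bucket as it is produced.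
import Mathlib
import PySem

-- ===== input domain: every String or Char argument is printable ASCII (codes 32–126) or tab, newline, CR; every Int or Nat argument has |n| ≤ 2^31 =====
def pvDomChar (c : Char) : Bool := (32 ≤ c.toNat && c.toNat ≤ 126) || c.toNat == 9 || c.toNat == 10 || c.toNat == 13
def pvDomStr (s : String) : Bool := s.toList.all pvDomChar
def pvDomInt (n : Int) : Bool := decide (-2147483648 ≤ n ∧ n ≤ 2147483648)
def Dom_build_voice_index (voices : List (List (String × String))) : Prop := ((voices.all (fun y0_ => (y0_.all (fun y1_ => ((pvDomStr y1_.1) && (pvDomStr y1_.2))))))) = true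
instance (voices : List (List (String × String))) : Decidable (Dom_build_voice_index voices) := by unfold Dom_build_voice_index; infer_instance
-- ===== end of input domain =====

-- B replaces A's incremental nested-defaultdict mutation plus in-place per-bucket sorting by a pure
-- group-by decomposition (extract key tuples once, then first-appearance key order + filtering);
-- objective: alternative (not claimed faster).

-- Shared Python-semantics shims used by both ports:
-- v.get(k) on a voice dict given as an association list (built into a Python dict first,
-- so a duplicated key means "last value wins", as in Python)
def pvVget (v : List (String × String)) (k : String) : Option String :=
  (PySem.Dict.ofList v).get? k

-- Python's `x or dflt` for an optional string x (None and "" are falsy)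
def pvOrElse (o : Option String) (dflt : String) : String :=
  match o with
  | some s => if s = "" then dflt else s
  | none => dflt

-- ===== PORT A =====
-- Literal port of A. `index[lang][gender][locale].append(v)` on the nested defaultdict is exactly
-- nested `Dict.modify` with the defaultdict's default; the second phase reassigns the value at every
-- existing key in place (key order unchanged), ported as a value map over the items, fused with the
-- final dict → association-list conversion required by the type convention.
def build_voice_index (voices : List (List (String × String))) : List (String × List (String × List (String × List (List (String × String))))) :=
  let index := voices.foldl (fun d v =>
    if pvOrElse (pvVget v "Locale") "" = "" ∨ (pvVget v "ShortName").getD "" = "" then d   -- continue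
    else
      d.modify (PySem.Str.lower (PySem.List.pyGetD ((PySem.Str.split? (pvOrElse (pvVget v "Locale") "") "-").getD []) 0 ""))
        PySem.Dict.empty (fun sub =>
          sub.modify (pvOrElse (pvVget v "Gender") "Unknown") PySem.Dict.empty (fun s2 =>
            s2.modify (pvOrElse (pvVget v "Locale") "") [] (fun lst => lst ++ [v]))))
    PySem.Dict.empty
  index.items.map (fun p => (p.1,
    p.2.items.map (fun q => (q.1,
      q.2.items.map (fun r => (r.1,
        PySem.List.sorted r.2 (fun x => (pvVget x "FriendlyName").getD "") false))))))

-- ===== PORT B =====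
-- B-side helpers
def pvLangOf (locale : String) : String :=
  PySem.Str.lower (PySem.List.pyGetD ((PySem.Str.split? locale "-").getD []) 0 "")

def pvFName (x : List (String × String)) : String :=
  (pvVget x "FriendlyName").getD ""

-- B's entry extraction: some (lang, (gender, (locale, v))) when locale and ShortName are truthy
def pvEntry? (v : List (String × String)) : Option (String × String × String × List (String × String)) :=
  let locale := pvOrElse (pvVget v "Locale") ""
  if locale ≠ "" ∧ (pvVget v "ShortName").getD "" ≠ "" then
    some (pvLangOf locale, (pvOrElse (pvVget v "Gender") "Unknown", (locale, v)))
  else none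

-- group(pairs): keys in first-appearance order (dict.fromkeys), each paired with its payloads
def pvGroup {β : Type} (pairs : List (String × β)) : List (String × List β) :=
  (PySem.List.dedup (pairs.map Prod.fst)).map
    (fun k => (k, (pairs.filter (fun p => p.1 == k)).map Prod.snd))

def build_voice_index_alt (voices : List (List (String × String))) : List (String × List (String × List (String × List (List (String × String))))) :=
  let entries := voices.filterMap pvEntry?
  (pvGroup entries).map (fun p => (p.1,
    (pvGroup p.2).map (fun q => (q.1,
      (pvGroup q.2).map (fun r => (r.1,
        PySem.List.sorted r.2 pvFName false))))))

-- ===== PRECONDITION & SPEC =====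
def Spec_build_voice_index (voices : List (List (String × String))) (out : List (String × List (String × List (String × List (List (String × String)))))) : Prop := out = build_voice_index_alt voices
instance (voices : List (List (String × String))) (out : List (String × List (String × List (String × List (List (String × String)))))) : Decidable (Spec_build_voice_index voices out) := by
  unfold Spec_build_voice_index
  -- nested DecidableEq assembled by hand (plain instance search exceeds its default size limit here)
  have h : DecidableEq (List (String × List (String × List (String × List (List (String × String)))))) := by
    refine @instDecidableEqList _ ?_
    refine @instDecidableEqProd _ _ ?_ ?_
    · infer_instance
    refine @instDecidableEqList _ ?_
    refine @instDecidableEqProd _ _ ?_ ?_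
    · infer_instance
    infer_instance
  exact h _ _

-- ===== CLAIM (what is proved, stated in full; the proofs are below) =====
def Claim_equal_build_voice_index : Prop := ∀ (voices : List (List (String × String))), Dom_build_voice_index voices → Spec_build_voice_index voices (build_voice_index voices)

-- ===== LEMMAS AND PROOFS =====

-- getD of a fold that modifies key (key x) at each step: only the matching entries act.
theorem pv_getD_foldl_modify {κ β ν : Type} [BEq κ] [LawfulBEq κ] [DecidableEq κ]
    (l : List β) (key : β → κ) (d0 : ν) (f : ν → β → ν) (d : PySem.Dict κ ν) (k : κ) :
    (l.foldl (fun d x => d.modify (key x) d0 (fun v => f v x)) d).getD k d0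
      = (l.filter (fun x => key x == k)).foldl f (d.getD k d0) := by
  induction l generalizing d with
  | nil => rfl
  | cons x l ih =>
    simp only [List.foldl_cons, List.filter_cons]
    by_cases h : key x = k
    · simp only [h, beq_self_eq_true, if_pos, List.foldl_cons, ih, PySem.Dict.getD_modify]
    · have hb : (key x == k) = false := by simp [h]
      simp only [hb, Bool.false_eq_true, if_false, ih, PySem.Dict.getD_modify,
        if_neg (Ne.symm h)]

-- the items of such a fold from the empty dict: first-appearance keys, each with its filtered fold.
theorem pv_items_foldl_modify {κ β ν : Type} [BEq κ] [LawfulBEq κ] [DecidableEq κ]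
    (l : List β) (key : β → κ) (d0 : ν) (f : ν → β → ν) :
    (l.foldl (fun d x => d.modify (key x) d0 (fun v => f v x)) PySem.Dict.empty).items
      = (PySem.List.dedup (l.map key)).map
          (fun k => (k, (l.filter (fun x => key x == k)).foldl f d0)) := by
  have hnd : (l.foldl (fun d x => d.modify (key x) d0 (fun v => f v x)) PySem.Dict.empty).keys.Nodup :=
    PySem.Dict.nodup_keys_foldl_modify_key l key d0 (fun _ x v => f v x) PySem.Dict.empty
      PySem.Dict.nodup_keys_empty
  rw [PySem.Dict.items_eq_map_keys _ hnd d0,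
      PySem.Dict.keys_foldl_modify_key l key d0 (fun _ x v => f v x) PySem.Dict.empty,
      PySem.Dict.keys_empty, PySem.Set.update_nil_left, ← PySem.List.dedup_eq_ofList]
  refine List.map_congr_left (fun k _ => ?_)
  rw [pv_getD_foldl_modify l key d0 f PySem.Dict.empty k, PySem.Dict.getD_empty]

-- innermost level: the locale buckets agree (entries are (locale, voice) pairs)
theorem pv_level3 (l : List (String × List (String × String))) :
    ((l.foldl (fun s2 e => s2.modify e.1 [] (fun lst => lst ++ [e.2])) PySem.Dict.empty).items).map
        (fun r => (r.1, PySem.List.sorted r.2 pvFName false))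
      = (pvGroup l).map (fun r => (r.1, PySem.List.sorted r.2 pvFName false)) := by
  rw [pv_items_foldl_modify l Prod.fst [] (fun lst e => lst ++ [e.2])]
  unfold pvGroup
  simp only [List.map_map]
  refine List.map_congr_left (fun k _ => ?_)
  simp only [Function.comp_apply]
  congr 2
  rw [← List.foldl_map (f := Prod.snd) (g := fun lst x => lst ++ [x]),
      PySem.List.foldl_append_singleton, List.nil_append]

-- middle level: the gender sub-indexes agree (entries are (gender, (locale, voice)) tuples)
theorem pv_level2 (l : List (String × String × List (String × String))) :
    ((l.foldl (fun sub e => sub.modify e.1 PySem.Dict.empty (fun s2 =>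
          s2.modify e.2.1 [] (fun lst => lst ++ [e.2.2]))) PySem.Dict.empty).items).map
        (fun q => (q.1, q.2.items.map (fun r => (r.1, PySem.List.sorted r.2 pvFName false))))
      = (pvGroup l).map (fun q => (q.1,
          (pvGroup q.2).map (fun r => (r.1, PySem.List.sorted r.2 pvFName false)))) := by
  rw [pv_items_foldl_modify l Prod.fst PySem.Dict.empty
        (fun s2 e => s2.modify e.2.1 [] (fun lst => lst ++ [e.2.2]))]
  conv_rhs => rw [pvGroup]
  simp only [List.map_map]
  refine List.map_congr_left (fun k _ => ?_)
  simp only [Function.comp_apply]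
  have h3 := pv_level3 ((l.filter (fun p => p.1 == k)).map Prod.snd)
  simp only [List.foldl_map] at h3
  exact congrArg (Prod.mk k) h3

-- outer level: the lang sub-indexes agree (entries are (lang, (gender, (locale, voice))) tuples)
theorem pv_level1 (l : List (String × String × String × List (String × String))) :
    ((l.foldl (fun d e => d.modify e.1 PySem.Dict.empty (fun sub =>
          sub.modify e.2.1 PySem.Dict.empty (fun s2 =>
            s2.modify e.2.2.1 [] (fun lst => lst ++ [e.2.2.2])))) PySem.Dict.empty).items).map
        (fun p => (p.1, p.2.items.map (fun q => (q.1,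
          q.2.items.map (fun r => (r.1, PySem.List.sorted r.2 pvFName false))))))
      = (pvGroup l).map (fun p => (p.1,
          (pvGroup p.2).map (fun q => (q.1,
            (pvGroup q.2).map (fun r => (r.1, PySem.List.sorted r.2 pvFName false)))))) := by
  rw [pv_items_foldl_modify l Prod.fst PySem.Dict.empty
        (fun sub e => sub.modify e.2.1 PySem.Dict.empty (fun s2 =>
          s2.modify e.2.2.1 [] (fun lst => lst ++ [e.2.2.2])))]
  conv_rhs => rw [pvGroup]
  simp only [List.map_map]
  refine List.map_congr_left (fun k _ => ?_)
  simp only [Function.comp_apply]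
  have h2 := pv_level2 ((l.filter (fun p => p.1 == k)).map Prod.snd)
  simp only [List.foldl_map] at h2
  exact congrArg (Prod.mk k) h2

-- A's guarded fold over the voices is the unguarded fold over B's extracted entries.
theorem pv_foldA (voices : List (List (String × String)))
    (d : PySem.Dict String (PySem.Dict String (PySem.Dict String (List (List (String × String)))))) :
    voices.foldl (fun d v =>
      if pvOrElse (pvVget v "Locale") "" = "" ∨ (pvVget v "ShortName").getD "" = "" then d
      else
        d.modify (PySem.Str.lower (PySem.List.pyGetD ((PySem.Str.split? (pvOrElse (pvVget v "Locale") "") "-").getD []) 0 ""))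
          PySem.Dict.empty (fun sub =>
            sub.modify (pvOrElse (pvVget v "Gender") "Unknown") PySem.Dict.empty (fun s2 =>
              s2.modify (pvOrElse (pvVget v "Locale") "") [] (fun lst => lst ++ [v])))) d
      = (voices.filterMap pvEntry?).foldl (fun d e =>
          d.modify e.1 PySem.Dict.empty (fun sub =>
            sub.modify e.2.1 PySem.Dict.empty (fun s2 =>
              s2.modify e.2.2.1 [] (fun lst => lst ++ [e.2.2.2])))) d := by
  induction voices generalizing d with
  | nil => rfl
  | cons v vs ih =>
    simp only [List.foldl_cons, List.filterMap_cons]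
    by_cases h : pvOrElse (pvVget v "Locale") "" = "" ∨ (pvVget v "ShortName").getD "" = ""
    · have he : pvEntry? v = none := by
        unfold pvEntry?
        simp only []
        rw [if_neg]
        tauto
      rw [if_pos h, he, ih]
    · have he : pvEntry? v
          = some (pvLangOf (pvOrElse (pvVget v "Locale") ""),
              (pvOrElse (pvVget v "Gender") "Unknown", (pvOrElse (pvVget v "Locale") "", v))) := by
        unfold pvEntry?
        simp only []
        rw [if_pos]
        tauto
      rw [if_neg h, he, List.foldl_cons, ih]
      rfl

-- ===== VERDICT (by name: the statement is the Claim_ definition above) =====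
theorem build_voice_index_spec : Claim_equal_build_voice_index := by
  intro voices _
  show build_voice_index voices = build_voice_index_alt voices
  simp only [build_voice_index, build_voice_index_alt]
  rw [pv_foldA]
  have hf : (fun x : List (String × String) => (pvVget x "FriendlyName").getD "") = pvFName := rfl
  rw [hf, pv_level1]
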